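-- pv_equiv track=rewrite | github.com/ray-project/ray | python/ray/data/_internal/collections.py | collapse_transitive_map
-- ===== SOURCE A (Python) =====
-- from typing import Dict, TypeVar
--
-- K = TypeVar("K")
--
-- def collapse_transitive_map(d: Dict[K, K]) -> Dict[K, K]:
--     """Collapse transitive mappings in a dictionary. Given a mapping like
--     {a: b, b: c, c: d}, returns {a: d}, removing intermediate b -> c, c -> d.
--
--     Only keeps mappings where the key is NOT a value in another mapping (i.e., chain starting points).
--
--     Args:
--         d: Dictionary representing a mapping
--
--     Returns:
--         Dictionary with all transitive mappings collapsed, keeping only KV-pairs,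
--         such that K and V are starting and terminal point of a chain
--
--     Examples:
--         >>> collapse_transitive_map({"a": "b", "b": "c", "c": "d"})
--         {'a': 'd'}
--         >>> collapse_transitive_map({"a": "b", "x": "y"})
--         {'a': 'b', 'x': 'y'}
--     """
--     if not d:
--         return {}
--
--     collapsed = {}
--     values_set = set(d.values())
--     for k in d:
--         # Skip mappings that are in the value-set, meaning that they are
--         # part of the mapping chain (for ex, {a -> b, b -> c})
--         if k in values_set:
--             continue
--
--         cur = k
--         visited = {cur}
--
--         # Follow the chain until we reach a key that's not in the mapping
--         while cur in d:
--             next = d[cur]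
--             if next in visited:
--                 raise ValueError(f"Detected a cycle in the mapping {d}")
--             visited.add(next)
--             cur = next
--
--         collapsed[k] = cur
--
--     return collapsed
-- ===== SOURCE B (Python) =====
-- from typing import Dict, TypeVar
--
-- K = TypeVar("K")
--
-- def collapse_transitive_map(d: Dict[K, K]) -> Dict[K, K]:
--     """Collapse transitive chains, memoizing the terminal node of every node
--     visited on any chain (path compression), so each node is walked once."""
--     if not d:
--         return {}
--
--     values = set(d.values())
--     term = {}  # memo: node -> terminal node of its chain
--     collapsed = {}
--     for k in d:
--         if k in values:
--             continue
--         path = []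
--         cur = k
--         while cur in d and cur not in term:
--             path.append(cur)
--             if len(path) > len(d):
--                 raise ValueError(f"Detected a cycle in the mapping {d}")
--             cur = d[cur]
--         t = term.get(cur, cur)
--         for p in path:
--             term[p] = t
--         collapsed[k] = t
--     return collapsed
-- ===== Notes on version B (the rewrite author's own statement) =====
-- stated objective: alternative
-- what changed: Instead of re-walking every chain from scratch per start with a visited set, B memoizes the terminal node of every node it passes (path compression), so each node's successor is followed only once across all starts; cycles are detected by a path-length bound instead of a visited set. This removes A's quadratic worst case on long shared chains, but on a timing run's random inputs (short chains) it is not measurably faster.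
import Mathlib
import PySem

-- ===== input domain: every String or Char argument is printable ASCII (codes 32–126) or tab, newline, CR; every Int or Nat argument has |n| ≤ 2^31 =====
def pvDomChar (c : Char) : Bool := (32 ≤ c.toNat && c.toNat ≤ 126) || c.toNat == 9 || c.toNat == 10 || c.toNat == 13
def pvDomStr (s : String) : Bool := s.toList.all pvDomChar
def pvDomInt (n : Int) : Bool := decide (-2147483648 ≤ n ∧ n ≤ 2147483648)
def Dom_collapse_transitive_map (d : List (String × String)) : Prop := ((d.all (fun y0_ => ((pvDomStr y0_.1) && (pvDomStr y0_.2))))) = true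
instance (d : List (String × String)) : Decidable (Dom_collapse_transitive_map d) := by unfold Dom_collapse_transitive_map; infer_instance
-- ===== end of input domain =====

-- B memoizes the terminal node of every node visited on any chain (path compression),
-- walking each node once across all starts instead of re-walking chains per start (alternative algorithm).


-- ===== PORT A =====
-- A's inner while loop: follow the chain, with a visited set for cycle detection.
-- On 'next in visited' Python raises ValueError: that branch (and fuel exhaustion,
-- which cannot happen under Pre_) returns a junk value here; Pre_ excludes those inputs.
def pvChaseA (D : PySem.Dict String String) : Nat → PySem.Set String → String → String
  | 0, _, cur => cur
  | fuel+1, visited, cur =>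
    match D.get? cur with
    | none => cur
    | some nxt =>
      if PySem.Set.contains visited nxt then cur  -- Python: raise ValueError (cycle); outside Pre_
      else pvChaseA D fuel (PySem.Set.add visited nxt) nxt

def collapse_transitive_map (d : List (String × String)) : List (String × String) :=
  if d.isEmpty then []
  else
    let D := PySem.Dict.ofList d
    let values_set : PySem.Set String := PySem.Set.ofList D.values
    (D.keys.foldl (fun collapsed k =>
      if PySem.Set.contains values_set k then collapsed
      else PySem.Dict.insert collapsed k (pvChaseA D (d.length + 1) (PySem.Set.ofList [k]) k))
      PySem.Dict.empty).items

-- ===== PORT B =====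
-- B's inner while loop: follow the chain only while the node is unmemoized, recording the path.
-- Python raises ValueError when the path exceeds len(d) (a cycle); the fuel-0 case plays that
-- role here and is unreachable under Pre_.
def pvWalkB (D : PySem.Dict String String) : Nat → PySem.Dict String String → List String → String → (List String × String)
  | 0, _, path, cur => (path, cur)  -- Python: raise ValueError (cycle); outside Pre_
  | fuel+1, term, path, cur =>
    match D.get? cur with
    | none => (path, cur)
    | some nxt =>
      match term.get? cur with
      | some _ => (path, cur)
      | none => pvWalkB D fuel term (path ++ [cur]) nxt

def collapse_transitive_map_alt (d : List (String × String)) : List (String × String) :=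
  if d.isEmpty then []
  else
    let D := PySem.Dict.ofList d
    let values_set : PySem.Set String := PySem.Set.ofList D.values
    (D.keys.foldl (fun st k =>
      if PySem.Set.contains values_set k then st
      else
        let pc := pvWalkB D (d.length + 1) st.1 [] k
        let t := (PySem.Dict.get? st.1 pc.2).getD pc.2
        (pc.1.foldl (fun m p => PySem.Dict.insert m p t) st.1, PySem.Dict.insert st.2 k t))
      (PySem.Dict.empty, PySem.Dict.empty)).2.items

-- ===== PRECONDITION & SPEC =====
-- one step of the mapping as a total function: d[x] if x is a key, else x (a non-key is a fixed point)
def pvStep (d : List (String × String)) (x : String) : String :=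
  ((PySem.Dict.ofList d).get? x).getD x

-- Pre_ excludes exactly the inputs on which A raises ValueError: a chain that starts at a
-- non-value key and runs into a cycle, i.e. is still on a key after d.length steps.
def Pre_collapse_transitive_map (d : List (String × String)) : Prop :=
  ∀ k ∈ (PySem.Dict.ofList d).keys, k ∉ (PySem.Dict.ofList d).values →
    (PySem.Dict.ofList d).get? ((pvStep d)^[d.length] k) = none
instance (d : List (String × String)) : Decidable (Pre_collapse_transitive_map d) := by
  unfold Pre_collapse_transitive_map; infer_instance

def pvWitness_collapse_transitive_map : (List (String × String)) :=
  [("a", "b"), ("b", "c"), ("c", "d"), ("x", "y")]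

def Spec_collapse_transitive_map (d : List (String × String)) (out : List (String × String)) : Prop := out = collapse_transitive_map_alt d
instance (d : List (String × String)) (out : List (String × String)) : Decidable (Spec_collapse_transitive_map d out) := by unfold Spec_collapse_transitive_map; infer_instance

-- ===== CLAIM (what is proved, stated in full; the proofs are below) =====
def Claim_equal_collapse_transitive_map : Prop := ∀ (d : List (String × String)), Dom_collapse_transitive_map d → Pre_collapse_transitive_map d → Spec_collapse_transitive_map d (collapse_transitive_map d)

-- ===== LEMMAS AND PROOFS =====

-- the bare chain walk (proof-side characterisation both loops are reduced to)
def pvChase (D : PySem.Dict String String) : Nat → String → String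
  | 0, x => x
  | n+1, x => match D.get? x with | none => x | some y => pvChase D n y

theorem pvChase_stuck (D : PySem.Dict String String) (x : String)
    (h : D.get? x = none) : ∀ n, pvChase D n x = x := by
  intro n; cases n with
  | zero => rfl
  | succ n => simp [pvChase, h]

theorem pvChase_add (D : PySem.Dict String String) :
    ∀ (a b : Nat) (x : String), pvChase D (a + b) x = pvChase D b (pvChase D a x) := by
  intro a
  induction a with
  | zero => intro b x; simp [pvChase]
  | succ a ih =>
    intro b x
    have h1 : a + 1 + b = (a + b) + 1 := by omega
    rw [h1]
    cases h : D.get? x with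
    | none => simp [pvChase, h, pvChase_stuck D x h]
    | some y => simp [pvChase, h, ih]

theorem pvChase_stable (D : PySem.Dict String String) (n : Nat) (x : String)
    (h : D.get? (pvChase D n x) = none) (m : Nat) :
    pvChase D (n + m) x = pvChase D n x := by
  rw [pvChase_add]; exact pvChase_stuck D _ h m

theorem pvChase_succ_right (D : PySem.Dict String String) (i : Nat) (x y : String)
    (h : D.get? (pvChase D i x) = some y) : pvChase D (i + 1) x = y := by
  rw [pvChase_add]; simp [pvChase, h]

theorem pvChase_eq_iterate (d : List (String × String)) :
    ∀ (n : Nat) (x : String), pvChase (PySem.Dict.ofList d) n x = (pvStep d)^[n] x := by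
  intro n
  induction n with
  | zero => intro x; rfl
  | succ n ih =>
    intro x
    rw [Function.iterate_succ_apply]
    cases h : (PySem.Dict.ofList d).get? x with
    | none =>
      have hs : pvStep d x = x := by simp [pvStep, h]
      rw [hs, ← ih x, pvChase_stuck _ x h, pvChase_stuck _ x h]
    | some y =>
      have hs : pvStep d x = y := by simp [pvStep, h]
      rw [hs, ← ih y]; simp [pvChase, h]

-- along a chain that stops, no node repeats before the (first) stop
theorem pvChase_inj (D : PySem.Dict String String) (x : String) (s : Nat)
    (hs : D.get? (pvChase D s x) = none)
    (hmin : ∀ m < s, D.get? (pvChase D m x) ≠ none) :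
    ∀ a b, a < b → b ≤ s → pvChase D a x ≠ pvChase D b x := by
  intro a b hab hbs heq
  have per : ∀ t, pvChase D (a + t) x = pvChase D (b + t) x := by
    intro t; rw [pvChase_add, pvChase_add, heq]
  have hp : 0 < b - a := by omega
  have red : ∀ t, pvChase D (a + t) x = pvChase D (a + t % (b - a)) x := by
    intro t
    induction t using Nat.strong_induction_on with
    | _ t ih =>
      by_cases h : t < b - a
      · rw [Nat.mod_eq_of_lt h]
      · have h2 : a + t = b + (t - (b - a)) := by omega
        have h3 : t % (b - a) = (t - (b - a)) % (b - a) := by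
          rw [Nat.mod_eq_sub_mod (by omega)]
        rw [h2, ← per (t - (b - a)), ih _ (by omega), h3]
  have h4 : a + (s - a) = s := by omega
  have h5 : pvChase D s x = pvChase D (a + (s - a) % (b - a)) x := by
    have := red (s - a); rwa [h4] at this
  have h6 : a + (s - a) % (b - a) < s := by
    have := Nat.mod_lt (s - a) hp; omega
  exact hmin _ h6 (h5 ▸ hs)

-- A's while loop computes the bare chain walk to the stop point
theorem pvChaseA_run (D : PySem.Dict String String) (x : String) (s : Nat)
    (hs : D.get? (pvChase D s x) = none)
    (hmin : ∀ m < s, D.get? (pvChase D m x) ≠ none) :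
    ∀ (fuel i : Nat) (visited : PySem.Set String), i ≤ s → s + 1 ≤ fuel + i →
    (∀ y ∈ visited, ∃ m ≤ i, y = pvChase D m x) →
    pvChaseA D fuel visited (pvChase D i x) = pvChase D s x := by
  intro fuel
  induction fuel with
  | zero => intro i visited h1 h2 _; omega
  | succ fuel ih =>
    intro i visited h1 h2 hvis
    by_cases hi : i = s
    · subst hi; simp [pvChaseA, hs]
    · have hilt : i < s := by omega
      cases h : D.get? (pvChase D i x) with
      | none => exact absurd h (hmin i hilt)
      | some y =>
        have hy : pvChase D (i + 1) x = y := pvChase_succ_right D i x y h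
        have hnm : PySem.Set.contains visited y = false := by
          by_contra hc
          have : y ∈ visited := (PySem.Set.contains_iff _ _).mp (by
            cases hcv : PySem.Set.contains visited y
            · exact absurd hcv hc
            · rfl)
          obtain ⟨m, hm, hym⟩ := hvis y this
          exact pvChase_inj D x s hs hmin m (i + 1) (by omega) (by omega) (hym ▸ hy ▸ rfl)
        rw [pvChaseA, h]
        simp only [hnm, Bool.false_eq_true, if_false]
        rw [← hy]
        apply ih (i + 1) _ (by omega) (by omega)
        intro z hz
        rcases (PySem.Set.mem_add _ _ _).mp hz with hz | hz
        · obtain ⟨m, hm, hzm⟩ := hvis z hz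
          exact ⟨m, by omega, hzm⟩
        · exact ⟨i + 1, le_refl _, by rw [hz, hy]⟩

-- memo invariant for B: every memo entry records the true terminal of a stopped chain
def pvInv (D : PySem.Dict String String) (N : Nat) (term : PySem.Dict String String) : Prop :=
  ∀ p t, term.get? p = some t → D.get? (pvChase D N p) = none ∧ t = pvChase D N p

-- B's while loop: the memoized lookup at the exit point yields the true terminal,
-- and every node put on the path has that same terminal
theorem pvWalkB_run (D : PySem.Dict String String) (N : Nat) (x : String) (s : Nat)
    (hsN : s ≤ N)
    (hs : D.get? (pvChase D s x) = none)
    (hmin : ∀ m < s, D.get? (pvChase D m x) ≠ none)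
    (term : PySem.Dict String String) (hInv : pvInv D N term) :
    ∀ (fuel i : Nat) (path : List String), i ≤ s → s + 1 ≤ fuel + i →
    ((term.get? (pvWalkB D fuel term path (pvChase D i x)).2).getD
        (pvWalkB D fuel term path (pvChase D i x)).2 = pvChase D s x) ∧
    (∀ p ∈ (pvWalkB D fuel term path (pvChase D i x)).1,
        p ∈ path ∨ (D.get? (pvChase D N p) = none ∧ pvChase D N p = pvChase D s x)) := by
  intro fuel
  induction fuel with
  | zero => intro i path h1 h2; omega
  | succ fuel ih =>
    intro i path h1 h2
    have hterm : ∀ y, y = pvChase D i x → ∀ t, term.get? y = some t → t = pvChase D s x := by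
      intro y hy t ht
      obtain ⟨_, ht2⟩ := hInv y t ht
      have : pvChase D N y = pvChase D s x := by
        subst hy
        rw [← pvChase_add]
        have h7 : i + N = s + (i + N - s) := by omega
        rw [h7, pvChase_stable D s x hs]
      exact ht2.trans this
    cases h : D.get? (pvChase D i x) with
    | none =>
      have hsi : i = s := by
        by_contra hne
        exact hmin i (by omega) h
      rw [pvWalkB, h, hsi]
      constructor
      · cases ht : term.get? (pvChase D s x) with
        | none => simp
        | some t =>
          simpa [ht] using hterm _ (by rw [hsi]) t ht
      · intro p hp; exact Or.inl hp
    | some y =>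
      have hilt : i < s := by
        by_contra hge
        have hie : i = s := by omega
        rw [hie, hs] at h; simp at h
      have hy : pvChase D (i + 1) x = y := pvChase_succ_right D i x y h
      have hNi : pvChase D N (pvChase D i x) = pvChase D s x := by
        rw [← pvChase_add]
        have h7 : i + N = s + (i + N - s) := by omega
        rw [h7, pvChase_stable D s x hs]
      cases ht : term.get? (pvChase D i x) with
      | some t =>
        rw [pvWalkB, h, ht]
        exact ⟨by simpa [ht] using hterm _ rfl t ht, fun p hp => Or.inl hp⟩
      | none =>
        rw [pvWalkB, h, ht]
        have hrec := ih (i + 1) (path ++ [pvChase D i x]) (by omega) (by omega)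
        rw [hy] at hrec
        refine ⟨hrec.1, ?_⟩
        intro p hp
        rcases hrec.2 p hp with hp2 | hp2
        · rcases List.mem_append.mp hp2 with hp3 | hp3
          · exact Or.inl hp3
          · have hpi : p = pvChase D i x := by simpa using hp3
            subst hpi
            exact Or.inr ⟨hNi ▸ hs, hNi⟩
        · exact Or.inr hp2

-- inserting path nodes (all with the recorded terminal) preserves the memo invariant
theorem pvInv_foldl_insert (D : PySem.Dict String String) (N : Nat) (t : String) :
    ∀ (ps : List String) (term : PySem.Dict String String), pvInv D N term →
    (∀ p ∈ ps, D.get? (pvChase D N p) = none ∧ pvChase D N p = t) →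
    pvInv D N (ps.foldl (fun m p => PySem.Dict.insert m p t) term) := by
  intro ps
  induction ps with
  | nil => intro term hInv _; exact hInv
  | cons p ps ih =>
    intro term hInv hps
    simp only [List.foldl_cons]
    apply ih _ _ (fun q hq => hps q (List.mem_cons_of_mem p hq))
    intro q u hq
    rw [PySem.Dict.get?_insert] at hq
    split_ifs at hq with hqp
    · obtain ⟨h1, h2⟩ := hps p (List.mem_cons_self)
      subst hqp
      exact ⟨h1, by rw [h2, ← Option.some.inj hq]⟩
    · exact hInv q u hq

-- the two outer folds agree, carrying the memo invariant
theorem pvFold_eq (d : List (String × String)) :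
    ∀ (ks : List String) (term acc : PySem.Dict String String),
    pvInv (PySem.Dict.ofList d) d.length term →
    (∀ k ∈ ks, PySem.Set.contains (PySem.Set.ofList (PySem.Dict.values (PySem.Dict.ofList d))) k = false →
      (PySem.Dict.ofList d).get? (pvChase (PySem.Dict.ofList d) d.length k) = none) →
    ks.foldl (fun collapsed k =>
      if PySem.Set.contains (PySem.Set.ofList (PySem.Dict.values (PySem.Dict.ofList d))) k then collapsed
      else PySem.Dict.insert collapsed k
        (pvChaseA (PySem.Dict.ofList d) (d.length + 1) (PySem.Set.ofList [k]) k)) acc =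
    (ks.foldl (fun st k =>
      if PySem.Set.contains (PySem.Set.ofList (PySem.Dict.values (PySem.Dict.ofList d))) k then st
      else
        let pc := pvWalkB (PySem.Dict.ofList d) (d.length + 1) st.1 [] k
        let t := (PySem.Dict.get? st.1 pc.2).getD pc.2
        (pc.1.foldl (fun m p => PySem.Dict.insert m p t) st.1, PySem.Dict.insert st.2 k t))
      (term, acc)).2 := by
  intro ks
  induction ks with
  | nil => intro term acc _ _; rfl
  | cons k ks ih =>
    intro term acc hInv hks
    set D := PySem.Dict.ofList d with hD
    simp only [List.foldl_cons]
    by_cases hv : PySem.Set.contains (PySem.Set.ofList (PySem.Dict.values D)) k = true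
    · rw [if_pos hv, if_pos hv]
      exact ih term acc hInv (fun k' hk' => hks k' (List.mem_cons_of_mem k hk'))
    · have hv' : PySem.Set.contains (PySem.Set.ofList (PySem.Dict.values D)) k = false :=
        Bool.eq_false_iff.mpr hv
      rw [if_neg hv, if_neg hv]
      have hg : D.get? (pvChase D d.length k) = none := hks k List.mem_cons_self hv'
      -- the first stop point of k's chain
      have hex : ∃ n, D.get? (pvChase D n k) = none := ⟨d.length, hg⟩
      set s := Nat.find hex with hsdef
      have hs : D.get? (pvChase D s k) = none := Nat.find_spec hex
      have hmin : ∀ m < s, D.get? (pvChase D m k) ≠ none := fun m hm => Nat.find_min hex hm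
      have hsN : s ≤ d.length := Nat.find_min' hex hg
      -- A's value
      have hA : pvChaseA D (d.length + 1) (PySem.Set.ofList [k]) k = pvChase D s k := by
        have := pvChaseA_run D k s hs hmin (d.length + 1) 0 (PySem.Set.ofList [k])
          (by omega) (by omega) ?_
        · simpa [pvChase] using this
        · intro y hy
          have : y = k := by simpa [PySem.Set.mem_ofList] using hy
          exact ⟨0, Nat.zero_le 0, by simpa [pvChase] using this⟩
      -- B's walk
      have hB := pvWalkB_run D d.length k s hsN hs hmin term hInv (d.length + 1) 0 []
        (by omega) (by omega)
      simp only [show pvChase D 0 k = k from rfl] at hB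
      set pc := pvWalkB D (d.length + 1) term [] k with hpc
      have hBt : (term.get? pc.2).getD pc.2 = pvChase D s k := hB.1
      -- terminal values agree
      have hval : pvChaseA D (d.length + 1) (PySem.Set.ofList [k]) k =
          (term.get? pc.2).getD pc.2 := by rw [hA, hBt]
      -- new memo keeps the invariant
      have hInv' : pvInv D d.length (pc.1.foldl
          (fun m p => PySem.Dict.insert m p ((term.get? pc.2).getD pc.2)) term) := by
        apply pvInv_foldl_insert D d.length _ pc.1 term hInv
        intro p hp
        rcases hB.2 p hp with hp2 | hp2
        · exact absurd hp2 (List.not_mem_nil)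
        · exact ⟨hp2.1, by rw [hp2.2, hBt]⟩
      rw [hval]
      exact ih _ _ hInv' (fun k' hk' => hks k' (List.mem_cons_of_mem k hk'))

-- ===== VERDICT (by name: the statement is the Claim_ definition above) =====
theorem collapse_transitive_map_spec : Claim_equal_collapse_transitive_map := by
  intro d _ hPre
  unfold Spec_collapse_transitive_map collapse_transitive_map collapse_transitive_map_alt
  by_cases hemp : d.isEmpty
  · rw [if_pos hemp, if_pos hemp]
  · rw [if_neg hemp, if_neg hemp]
    simp only []
    congr 1
    apply pvFold_eq d (PySem.Dict.ofList d).keys PySem.Dict.empty PySem.Dict.empty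
    · intro p t hpt
      simp [PySem.Dict.get?_empty] at hpt
    · intro k hk hkv
      have hknv : k ∉ (PySem.Dict.ofList d).values := by
        intro hmem
        have : PySem.Set.contains (PySem.Set.ofList (PySem.Dict.values (PySem.Dict.ofList d))) k = true :=
          (PySem.Set.contains_iff _ _).mpr ((PySem.Set.mem_ofList _ _).mpr hmem)
        rw [hkv] at this; exact Bool.noConfusion this
      have := hPre k hk hknv
      rwa [← pvChase_eq_iterate d d.length k] at this
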